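-- pv_equiv track=rewrite | github.com/drago668/Algoritmica | adventJs_midu.dev/gifts.py | filter_gifts
-- ===== SOURCE A (Python) =====
-- import string
--
-- def filter_gifts(gifts):
--     goodGifts = []
--     accept=True
--
--     for gift in gifts:
--         for char in gift:
--
--             if char in string.punctuation:
--                 accept=False
--
--         if accept:
--             goodGifts.append(gift)
--
--         accept=True
--     return goodGifts
-- ===== SOURCE B (Python) =====
-- import string
--
-- _DELETE_PUNCT = str.maketrans('', '', string.punctuation)
--
-- def filter_gifts(gifts):
--     # keep a gift iff deleting all punctuation from it changes nothing
--     return [g for g in gifts if len(g.translate(_DELETE_PUNCT)) == len(g)]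
-- ===== Notes on version B (the rewrite author's own statement) =====
-- stated objective: alternative
-- what changed: Replaces A's flag-carrying double loop (per-char membership test in string.punctuation) with a transformation-based test: a precomputed str.maketrans deletion table, keeping a gift iff translate deletes nothing (length unchanged).
import Mathlib
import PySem

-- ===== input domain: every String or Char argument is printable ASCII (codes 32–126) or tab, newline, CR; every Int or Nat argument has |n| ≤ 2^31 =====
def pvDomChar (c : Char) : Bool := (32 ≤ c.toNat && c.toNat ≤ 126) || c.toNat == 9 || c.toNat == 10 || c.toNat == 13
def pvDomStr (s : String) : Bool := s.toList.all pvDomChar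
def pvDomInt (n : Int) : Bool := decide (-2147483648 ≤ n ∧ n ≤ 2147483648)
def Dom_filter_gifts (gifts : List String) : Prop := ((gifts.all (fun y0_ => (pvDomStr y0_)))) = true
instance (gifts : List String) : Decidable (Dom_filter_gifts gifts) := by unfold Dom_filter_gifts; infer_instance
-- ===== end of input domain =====

-- B replaces A's flag-carrying double loop by a transformation test: delete punctuation with a translation table and keep the gift iff its length is unchanged (alternative decomposition, same result).

-- ===== PORT A =====
-- string.punctuation
def pvPunct : String := "!\"#$%&'()*+,-./:;<=>?@[\\]^_`{|}~"

-- A: flag-carrying double loop; the inner loop scans every character, setting accept=False on punctuation.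
def filter_gifts (gifts : List String) : List String :=
  (gifts.foldl (fun (st : List String × Bool) gift =>
      let accept := gift.toList.foldl (fun acc char =>
        if pvPunct.toList.contains char then false else acc) st.2
      let goodGifts := if accept then st.1 ++ [gift] else st.1
      (goodGifts, true)) ([], true)).1

-- ===== PORT B =====
-- str.translate with a maketrans('', '', string.punctuation) table deletes exactly the
-- characters of string.punctuation and leaves every other character; ported as a filter
-- (exact: the table maps each punctuation char to None and no other char).
def pvTranslateDeletePunct (cs : List Char) : List Char :=
  cs.filter (fun c => !pvPunct.toList.contains c)

-- B: [g for g in gifts if len(g.translate(_DELETE_PUNCT)) == len(g)]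
def filter_gifts_alt (gifts : List String) : List String :=
  gifts.filter (fun g => (pvTranslateDeletePunct g.toList).length == g.toList.length)

-- ===== PRECONDITION & SPEC =====
def Spec_filter_gifts (gifts : List String) (out : List String) : Prop := out = filter_gifts_alt gifts
instance (gifts : List String) (out : List String) : Decidable (Spec_filter_gifts gifts out) := by unfold Spec_filter_gifts; infer_instance

-- ===== CLAIM (what is proved, stated in full; the proofs are below) =====
def Claim_equal_filter_gifts : Prop := ∀ (gifts : List String), Dom_filter_gifts gifts → Spec_filter_gifts gifts (filter_gifts gifts)

-- ===== LEMMAS AND PROOFS =====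

-- A's inner flag loop starting from b computes "b and no character of cs is punctuation".
lemma flag_fold (cs : List Char) (b : Bool) :
    cs.foldl (fun acc char => if pvPunct.toList.contains char then false else acc) b
      = (b && cs.all (fun c => !pvPunct.toList.contains c)) := by
  induction cs generalizing b with
  | nil => simp
  | cons c cs ih =>
    rw [List.foldl_cons, ih]
    by_cases h : pvPunct.toList.contains c <;> cases b <;> simp [h]

-- B's length test equals "no character of cs is punctuation".
lemma translate_len_eq (cs : List Char) :
    ((pvTranslateDeletePunct cs).length == cs.length)
      = cs.all (fun c => !pvPunct.toList.contains c) := by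
  rw [Bool.eq_iff_iff]
  simp [pvTranslateDeletePunct, List.length_filter_eq_length_iff, List.all_eq_true]

-- The flag loop in "all" form, for any accumulator prefix, is a filter appended to the prefix.
lemma foldAll (P : Char → Bool) (gifts : List String) (acc : List String) :
    (gifts.foldl (fun (st : List String × Bool) gift =>
      ((if st.2 && gift.toList.all P then st.1 ++ [gift] else st.1), true)) (acc, true)).1
    = acc ++ gifts.filter (fun g => g.toList.all P) := by
  induction gifts generalizing acc with
  | nil => simp
  | cons g gs ih =>
    simp only [List.foldl_cons, Bool.true_and, List.filter_cons]
    cases h : g.toList.all P with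
    | true => rw [if_pos rfl, if_pos rfl, ih (acc ++ [g])]; simp
    | false => rw [if_neg (by simp), if_neg (by simp)]; exact ih acc

-- ===== VERDICT (by name: the statement is the Claim_ definition above) =====
theorem filter_gifts_spec : Claim_equal_filter_gifts := by
  intro gifts _
  unfold Spec_filter_gifts filter_gifts filter_gifts_alt
  simp only [flag_fold]
  rw [foldAll, List.nil_append]
  exact (List.filter_congr (fun g _ => by rw [translate_len_eq])).symm
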